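-- pv_equiv track=rewrite | github.com/ymallavarapu7/timesheet | backend/app/services/extraction.py | _split_into_blocks
-- ===== SOURCE A (Python) =====
-- def _split_into_blocks(rows: list[list[str]]) -> list[list[list[str]]]:
--     """Split rows horizontally on fully-empty separator columns.
--
--     Excel sheets often pack multiple unrelated tables side-by-side with a blank
--     column between them. This returns one rows-list per dense block.
--     """
--     if not rows:
--         return []
--     width = max((len(r) for r in rows), default=0)
--     if width == 0:
--         return []
--     # A column is "empty" when no row has any non-whitespace content there.
--     empty_cols = {
--         c for c in range(width)
--         if all(((row[c] if c < len(row) else "")).strip() == "" for row in rows)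
--     }
--     # Walk columns left→right, accumulating dense ranges separated by empties.
--     ranges: list[tuple[int, int]] = []
--     start: int | None = None
--     for c in range(width):
--         if c in empty_cols:
--             if start is not None:
--                 ranges.append((start, c))
--                 start = None
--         else:
--             if start is None:
--                 start = c
--     if start is not None:
--         ranges.append((start, width))
--     blocks: list[list[list[str]]] = []
--     for s, e in ranges:
--         block = [row[s:e] for row in rows]
--         # Drop rows that are fully empty inside this block.
--         block = [row for row in block if any(cell.strip() for cell in row)]
--         if block:
--             blocks.append(block)
--     return blocks
-- ===== SOURCE B (Python) =====
-- def _split_into_blocks(rows: list[list[str]]) -> list[list[list[str]]]: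
--     """Streaming single pass over columns: build each block cell-by-cell in a
--     running accumulator, flushing it whenever an empty separator column is hit.
--     No empty-column set, no (start, end) ranges, no slicing."""
--     if not rows:
--         return []
--     width = max((len(r) for r in rows), default=0)
--
--     blocks: list[list[list[str]]] = []
--     cur: list[list[str]] | None = None  # partial rows of the block being grown
--
--     def flush() -> None:
--         nonlocal cur
--         if cur is not None:
--             block = [r for r in cur if any(cell.strip() for cell in r)]
--             if block:
--                 blocks.append(block)
--             cur = None
--
--     for c in range(width):
--         col = [(row[c] if c < len(row) else "") for row in rows]
--         if all(v.strip() == "" for v in col):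
--             flush()
--         else:
--             if cur is None:
--                 cur = [[] for _ in rows]
--             for i in range(len(rows)):
--                 if c < len(rows[i]):
--                     cur[i].append(rows[i][c])
--     flush()
--     return blocks
-- ===== Notes on version B (the rewrite author's own statement) =====
-- stated objective: alternative
-- what changed: Replaces A's three staged passes (precompute the empty-column set, run a start/None state machine to collect (start,end) ranges, then slice each row per range) with one streaming pass over columns that grows the current block's rows cell-by-cell in an accumulator and flushes it whenever an empty separator column is reached; no column set, no ranges and no slicing are ever materialised.
import Mathlib
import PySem

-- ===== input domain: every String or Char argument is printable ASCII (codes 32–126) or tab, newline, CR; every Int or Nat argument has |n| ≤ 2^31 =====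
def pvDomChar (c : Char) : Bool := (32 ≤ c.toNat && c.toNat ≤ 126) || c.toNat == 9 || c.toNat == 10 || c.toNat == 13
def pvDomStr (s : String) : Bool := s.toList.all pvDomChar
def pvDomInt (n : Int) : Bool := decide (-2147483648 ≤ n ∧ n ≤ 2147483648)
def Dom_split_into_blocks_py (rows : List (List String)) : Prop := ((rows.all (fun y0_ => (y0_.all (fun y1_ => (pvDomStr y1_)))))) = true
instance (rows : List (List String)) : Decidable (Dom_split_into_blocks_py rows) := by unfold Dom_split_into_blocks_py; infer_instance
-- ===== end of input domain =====

-- B replaces A's three staged passes (empty-column set, start/None range scan, per-range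
-- slicing) by one streaming pass over columns that grows the current block cell-by-cell
-- and flushes it at each empty separator column (alternative decomposition, same cost).

-- ===== PORT A =====

-- `(row[c] if c < len(row) else "").strip() == ""` for every row
def aEmptyCol (rows : List (List String)) (c : Nat) : Bool :=
  rows.all (fun row => PySem.Str.strip (row.getD c "") == "")

-- the loop body of A's `for c in range(width)` walk (state = (ranges, start))
def aStep (emptyCols : List Nat) (st : List (Nat × Nat) × Option Nat) (c : Nat) :
    List (Nat × Nat) × Option Nat :=
  if emptyCols.contains c then
    match st.2 with
    | some s => (st.1 ++ [(s, c)], none)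
    | none => st
  else
    match st.2 with
    | none => (st.1, some c)
    | some _ => st

-- the body of A's `for s, e in ranges` loop
def aBlk (rows : List (List String)) (blocks : List (List (List String))) (se : Nat × Nat) :
    List (List (List String)) :=
  let block := rows.map (fun row => PySem.List.slice row (some (se.1 : Int)) (some (se.2 : Int)))
  let block := block.filter (fun row => row.any (fun cell => PySem.Str.strip cell != ""))
  if block ≠ [] then blocks ++ [block] else blocks

def split_into_blocks_py (rows : List (List String)) : List (List (List String)) :=
  if rows = [] then []
  else
    let width := rows.foldl (fun acc r => Nat.max acc r.length) 0
    if width = 0 then []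
    else
      let emptyCols := (List.range width).filter (aEmptyCol rows)
      let st := (List.range width).foldl (aStep emptyCols) ([], none)
      let ranges := st.1 ++ (match st.2 with | some s => [(s, width)] | none => [])
      ranges.foldl (aBlk rows) []

-- ===== PORT B =====

-- `flush()`: filter out fully-empty rows of the partial block and append it if nonempty
def bFlush (blocks : List (List (List String))) (cur : Option (List (List String))) :
    List (List (List String)) :=
  match cur with
  | none => blocks
  | some cs =>
    let block := cs.filter (fun r => r.any (fun cell => PySem.Str.strip cell != ""))
    if block ≠ [] then blocks ++ [block] else blocks

-- one column of B's streaming pass (state = (blocks, cur))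
def bStep (rows : List (List String))
    (st : List (List (List String)) × Option (List (List String))) (c : Nat) :
    List (List (List String)) × Option (List (List String)) :=
  let col := rows.map (fun row => row.getD c "")
  if col.all (fun v => PySem.Str.strip v == "") then
    (bFlush st.1 st.2, none)
  else
    let cur := st.2.getD (rows.map (fun _ => []))
    (st.1, some ((cur.zip rows).map
      (fun p => if c < p.2.length then p.1 ++ [p.2.getD c ""] else p.1)))

def split_into_blocks_py_alt (rows : List (List String)) : List (List (List String)) :=
  if rows = [] then []
  else
    let width := rows.foldl (fun acc r => Nat.max acc r.length) 0
    let st := (List.range width).foldl (bStep rows) ([], none)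
    bFlush st.1 st.2

-- ===== PRECONDITION & SPEC =====
def Spec_split_into_blocks_py (rows : List (List String)) (out : List (List (List String))) : Prop := out = split_into_blocks_py_alt rows
instance (rows : List (List String)) (out : List (List (List String))) : Decidable (Spec_split_into_blocks_py rows out) := by unfold Spec_split_into_blocks_py; infer_instance

-- ===== CLAIM (what is proved, stated in full; the proofs are below) =====
def Claim_equal_split_into_blocks_py : Prop := ∀ (rows : List (List String)), Dom_split_into_blocks_py rows → Spec_split_into_blocks_py rows (split_into_blocks_py rows)

-- ===== LEMMAS AND PROOFS =====

-- the partial rows of B's accumulator when A's scan state is `start = some s` at column c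
def curOf (rows : List (List String)) (st? : Option Nat) (c : Nat) :
    Option (List (List String)) :=
  st?.map (fun s => rows.map (fun row => (row.drop s).take (c - s)))

theorem slice_eq_dropTake (row : List String) (s e : Nat) :
    PySem.List.slice row (some (s : Int)) (some (e : Int)) = (row.drop s).take (e - s) :=
  PySem.List.slice_natCast row s e

theorem dropTake_succ (row : List String) (s c : Nat) (h : s ≤ c) :
    (row.drop s).take (c + 1 - s)
      = (row.drop s).take (c - s) ++ (if c < row.length then [row.getD c ""] else []) := by
  have h1 : c + 1 - s = (c - s) + 1 := by omega
  rw [h1, List.take_add_one]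
  congr 1
  rw [List.getElem?_drop]
  have h2 : s + (c - s) = c := by omega
  rw [h2]
  by_cases hc : c < row.length
  · simp [hc, List.getD_eq_getElem?_getD]
  · simp [hc]

theorem zipMap_eq_map {α β γ : Type} (rows : List α) (f : α → β) (g : β × α → γ) :
    ((rows.map f).zip rows).map g = rows.map (fun r => g (f r, r)) := by
  induction rows with
  | nil => rfl
  | cons r rows ih => simp [ih]

theorem bEmpty_eq (rows : List (List String)) (c : Nat) :
    (rows.map (fun row => row.getD c "")).all (fun v => PySem.Str.strip v == "")
      = aEmptyCol rows c := by
  unfold aEmptyCol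
  rw [List.all_map]
  rfl

theorem hcontains (rows : List (List String)) (width c : Nat) (hc : c < width) :
    ((List.range width).filter (aEmptyCol rows)).contains c = aEmptyCol rows c := by
  rw [List.contains_eq_mem]
  by_cases h : aEmptyCol rows c = true <;>
    simp [List.mem_filter, List.mem_range, hc, h]

-- the core invariant: B's streaming fold from column c equals A's range scan + block build
theorem inv (rows : List (List String)) (width : Nat) :
    ∀ (n c : Nat) (rs : List (Nat × Nat)) (st? : Option Nat)
      (blocks0 : List (List (List String))),
      c + n = width → (∀ s, st? = some s → s ≤ c) →
      (let F := (List.range' c n).foldl (bStep rows) (rs.foldl (aBlk rows) blocks0, curOf rows st? c)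
       bFlush F.1 F.2)
      = (let aF := (List.range' c n).foldl (aStep ((List.range width).filter (aEmptyCol rows))) (rs, st?)
         (aF.1 ++ (match aF.2 with | some s => [(s, width)] | none => [])).foldl (aBlk rows) blocks0) := by
  intro n
  induction n with
  | zero =>
    intro c rs st? blocks0 h hs
    have hc : c = width := by omega
    subst hc
    rcases st? with _ | s
    · simp [curOf, bFlush]
    · simp only [List.range'_zero, List.foldl_nil, curOf, Option.map_some, bFlush,
        List.foldl_append, List.foldl_cons, List.foldl_nil, aBlk, slice_eq_dropTake]
  | succ n ih =>
    intro c rs st? blocks0 h hs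
    have hcw : c < width := by omega
    have hcon := hcontains rows width c hcw
    rw [List.range'_succ, List.foldl_cons, List.foldl_cons]
    rcases st? with _ | s <;> by_cases hp : aEmptyCol rows c = true
    · -- no current block, empty column: both states unchanged
      have hb : bStep rows (rs.foldl (aBlk rows) blocks0, curOf rows none c) c
          = (rs.foldl (aBlk rows) blocks0, curOf rows none (c + 1)) := by
        unfold bStep
        simp only [bEmpty_eq, hp]
        simp [curOf, bFlush]
      have ha : aStep ((List.range width).filter (aEmptyCol rows)) (rs, none) c = (rs, none) := by
        unfold aStep; rw [hcon, if_pos hp]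
      rw [hb, ha]
      exact ih (c + 1) rs none blocks0 (by omega) (by simp)
    · -- no current block, content column: open a block at s = c
      have hb : bStep rows (rs.foldl (aBlk rows) blocks0, curOf rows none c) c
          = (rs.foldl (aBlk rows) blocks0, curOf rows (some c) (c + 1)) := by
        unfold bStep
        simp only [bEmpty_eq, hp, if_false, Bool.false_eq_true, curOf,
          Option.map_none, Option.getD_none, Option.map_some]
        rw [zipMap_eq_map]
        congr 1
        congr 1
        refine List.map_congr_left fun row _ => ?_
        simp only
        have h0 : (row.drop c).take (c - c) = [] := by simp
        have hstep := dropTake_succ row c c (le_refl c)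
        rw [h0] at hstep
        rw [hstep]
        by_cases hcl : c < row.length <;> simp [hcl]
      have ha : aStep ((List.range width).filter (aEmptyCol rows)) (rs, none) c
          = (rs, some c) := by
        unfold aStep; rw [hcon, if_neg (by simp [hp])]
      rw [hb, ha]
      exact ih (c + 1) rs (some c) blocks0 (by omega)
        (by intro s hss; cases hss; omega)
    · -- current block open at s, empty column: flush it / close the range at (s, c)
      have hb : bStep rows (rs.foldl (aBlk rows) blocks0, curOf rows (some s) c) c
          = ((rs ++ [(s, c)]).foldl (aBlk rows) blocks0, curOf rows none (c + 1)) := by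
        unfold bStep
        simp only [bEmpty_eq, hp]
        simp only [if_true, curOf, Option.map_some, Option.map_none, bFlush,
          List.foldl_append, List.foldl_cons, List.foldl_nil, aBlk, slice_eq_dropTake]
      have ha : aStep ((List.range width).filter (aEmptyCol rows)) (rs, some s) c
          = (rs ++ [(s, c)], none) := by
        unfold aStep; rw [hcon, if_pos hp]
      rw [hb, ha]
      exact ih (c + 1) (rs ++ [(s, c)]) none blocks0 (by omega) (by simp)
    · -- current block open at s, content column: append column c to the partial rows
      have hsc : s ≤ c := hs s rfl
      have hb : bStep rows (rs.foldl (aBlk rows) blocks0, curOf rows (some s) c) c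
          = (rs.foldl (aBlk rows) blocks0, curOf rows (some s) (c + 1)) := by
        unfold bStep
        simp only [bEmpty_eq, hp, if_false, Bool.false_eq_true, curOf,
          Option.map_some, Option.getD_some]
        rw [zipMap_eq_map]
        congr 1
        congr 1
        refine List.map_congr_left fun row _ => ?_
        simp only
        rw [dropTake_succ row s c hsc]
        by_cases hcl : c < row.length <;> simp [hcl]
      have ha : aStep ((List.range width).filter (aEmptyCol rows)) (rs, some s) c
          = (rs, some s) := by
        unfold aStep; rw [hcon, if_neg (by simp [hp])]
      rw [hb, ha]
      exact ih (c + 1) rs (some s) blocks0 (by omega)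
        (by intro t htt; cases htt; omega)

theorem main_spec (rows : List (List String)) :
    split_into_blocks_py rows = split_into_blocks_py_alt rows := by
  unfold split_into_blocks_py split_into_blocks_py_alt
  by_cases h0 : rows = []
  · simp [h0]
  · rw [if_neg h0, if_neg h0]
    set width := rows.foldl (fun acc r => Nat.max acc r.length) 0 with hwdef
    by_cases hw : width = 0
    · rw [if_pos hw, hw]
      simp [bFlush]
    · rw [if_neg hw]
      have := inv rows width width 0 [] none []
        (by omega) (by simp)
      simp only [curOf, Option.map_none, List.foldl_nil] at this
      rw [← List.range_eq_range'] at this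
      exact (this.symm)

-- ===== VERDICT (by name: the statement is the Claim_ definition above) =====
theorem split_into_blocks_py_spec : Claim_equal_split_into_blocks_py := by
  intro rows _
  exact main_spec rows
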